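-- pv_equiv track=rewrite | github.com/phildsnutz/Xiphos-Vetting | backend/osint/careers_scraper.py | _identify_subcontractors
-- ===== SOURCE A (Python) =====
-- def _identify_subcontractors(posts: list[dict], prime_name: str) -> dict[str, list[dict]]:
--     """
--     Group job postings by company name, separating prime from potential subs.
--     Returns dict: { company_name: [posts] } excluding the prime.
--     """
--     subs: dict[str, list[dict]] = {}
--     prime_lower = prime_name.lower()
--     prime_tokens = set(prime_lower.split())
--
--     for post in posts:
--         company = post.get("company", "").strip()
--         if not company:
--             continue
--
--         company_lower = company.lower()
--         # Skip if this IS the prime contractor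
--         if (prime_lower in company_lower or company_lower in prime_lower
--                 or prime_tokens & set(company_lower.split())):
--             continue
--
--         if company not in subs:
--             subs[company] = []
--         subs[company].append(post)
--
--     return subs
-- ===== SOURCE B (Python) =====
-- def _identify_subcontractors(posts: list[dict], prime_name: str) -> dict[str, list[dict]]:
--     # Dict-free regrouping: collect the distinct non-prime company names in
--     # first-occurrence order, then build each group by filtering the posts
--     # list per name (no incremental dict of lists at all).
--     prime_lower = prime_name.lower()
--     prime_tokens = set(prime_lower.split())
--
--     def kept(company: str) -> bool:
--         if not company:
--             return False
--         cl = company.lower()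
--         return not (prime_lower in cl or cl in prime_lower
--                     or prime_tokens & set(cl.split()))
--
--     names: list[str] = []
--     for post in posts:
--         c = post.get("company", "").strip()
--         if kept(c) and c not in names:
--             names.append(c)
--
--     return {c: [p for p in posts if p.get("company", "").strip() == c] for c in names}
-- ===== Notes on version B (the rewrite author's own statement) =====
-- stated objective: alternative
-- what changed: B drops the incrementally-built dict of lists entirely: it first collects the distinct non-prime company names in first-occurrence order, then builds each group by filtering the whole posts list per name; this trades A's single-pass dict grouping for k+1 plain list scans.
import Mathlib
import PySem

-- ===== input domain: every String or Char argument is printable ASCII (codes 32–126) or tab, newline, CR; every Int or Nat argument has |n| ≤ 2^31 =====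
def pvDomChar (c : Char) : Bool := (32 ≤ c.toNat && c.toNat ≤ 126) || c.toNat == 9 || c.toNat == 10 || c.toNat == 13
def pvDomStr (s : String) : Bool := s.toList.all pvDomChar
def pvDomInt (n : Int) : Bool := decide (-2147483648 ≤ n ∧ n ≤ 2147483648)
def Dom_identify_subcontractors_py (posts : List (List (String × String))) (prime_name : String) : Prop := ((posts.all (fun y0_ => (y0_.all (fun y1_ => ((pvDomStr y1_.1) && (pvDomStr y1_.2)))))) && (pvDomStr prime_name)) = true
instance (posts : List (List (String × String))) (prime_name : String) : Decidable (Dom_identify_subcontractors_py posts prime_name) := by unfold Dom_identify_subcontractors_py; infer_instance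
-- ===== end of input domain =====

-- B replaces A's incrementally-built dict of lists by two plain list stages: collect the distinct non-prime company names in first-occurrence order, then build each group by filtering the posts list per name (alternative decomposition, same results).

-- ===== PORT A =====
def identify_subcontractors_py (posts : List (List (String × String))) (prime_name : String) : List (String × List (List (String × String))) :=
  let prime_lower := PySem.Str.lower prime_name
  let prime_tokens : PySem.Set String := PySem.Set.ofList (PySem.Str.split₀ prime_lower)
  (posts.foldl (fun (subs : PySem.Dict String (List (List (String × String)))) post =>
    let company := PySem.Str.strip ((PySem.Dict.ofList post).getD "company" "")
    if company = "" then subs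
    else
      let company_lower := PySem.Str.lower company
      if PySem.Str.isIn prime_lower company_lower || PySem.Str.isIn company_lower prime_lower
          || !(PySem.Set.inter prime_tokens (PySem.Set.ofList (PySem.Str.split₀ company_lower))).isEmpty
      then subs
      else
        let subs1 := if subs.contains company then subs else subs.insert company []
        subs1.modify company [] (fun l => l ++ [post])) PySem.Dict.empty).items

-- ===== PORT B =====
-- B's per-company `kept` test (python helper `kept`)
def pvKept (prime_lower : String) (prime_tokens : PySem.Set String) (company : String) : Bool :=
  if company = "" then false
  else
    let cl := PySem.Str.lower company
    !(PySem.Str.isIn prime_lower cl || PySem.Str.isIn cl prime_lower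
        || !(PySem.Set.inter prime_tokens (PySem.Set.ofList (PySem.Str.split₀ cl))).isEmpty)

def identify_subcontractors_py_alt (posts : List (List (String × String))) (prime_name : String) : List (String × List (List (String × String))) :=
  let prime_lower := PySem.Str.lower prime_name
  let prime_tokens : PySem.Set String := PySem.Set.ofList (PySem.Str.split₀ prime_lower)
  let names := posts.foldl (fun (ns : List String) post =>
    let c := PySem.Str.strip ((PySem.Dict.ofList post).getD "company" "")
    if pvKept prime_lower prime_tokens c && !(ns.contains c) then ns ++ [c] else ns) []
  names.map (fun c => (c, posts.filter (fun p =>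
    PySem.Str.strip ((PySem.Dict.ofList p).getD "company" "") == c)))

-- ===== PRECONDITION & SPEC =====
def Spec_identify_subcontractors_py (posts : List (List (String × String))) (prime_name : String) (out : List (String × List (List (String × String)))) : Prop := out = identify_subcontractors_py_alt posts prime_name
instance (posts : List (List (String × String))) (prime_name : String) (out : List (String × List (List (String × String)))) : Decidable (Spec_identify_subcontractors_py posts prime_name out) := by unfold Spec_identify_subcontractors_py; infer_instance

-- ===== CLAIM =====
def Claim_equal_identify_subcontractors_py : Prop := ∀ (posts : List (List (String × String))) (prime_name : String), Dom_identify_subcontractors_py posts prime_name → Spec_identify_subcontractors_py posts prime_name (identify_subcontractors_py posts prime_name)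

-- ===== LEMMAS AND PROOFS =====

-- the stripped company of a post
def pvComp (post : List (String × String)) : String :=
  PySem.Str.strip ((PySem.Dict.ofList post).getD "company" "")

-- A's fold step, abstracted over the fixed prime data
def pvStepA (pl : String) (pt : PySem.Set String)
    (subs : PySem.Dict String (List (List (String × String)))) (post : List (String × String)) :
    PySem.Dict String (List (List (String × String))) :=
  let company := pvComp post
  if company = "" then subs
  else
    let company_lower := PySem.Str.lower company
    if PySem.Str.isIn pl company_lower || PySem.Str.isIn company_lower pl
        || !(PySem.Set.inter pt (PySem.Set.ofList (PySem.Str.split₀ company_lower))).isEmpty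
    then subs
    else
      let subs1 := if subs.contains company then subs else subs.insert company []
      subs1.modify company [] (fun l => l ++ [post])

-- B's name-collecting fold step
def pvStepN (pl : String) (pt : PySem.Set String) (ns : List String) (post : List (String × String)) :
    List String :=
  let c := pvComp post
  if pvKept pl pt c && !(ns.contains c) then ns ++ [c] else ns

-- A's step performs one uniform dict update exactly on kept companies
theorem pvStepA_eq (pl : String) (pt : PySem.Set String)
    (d : PySem.Dict String (List (List (String × String)))) (post : List (String × String)) :
    pvStepA pl pt d post =
      if pvKept pl pt (pvComp post) then (d.insert (pvComp post) (d.getD (pvComp post) [] ++ [post])) else d := by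
  unfold pvStepA pvKept
  set c := pvComp post with hc
  by_cases h0 : c = ""
  · simp [h0]
  · simp only [if_neg h0]
    set cond := PySem.Str.isIn pl (PySem.Str.lower c) || PySem.Str.isIn (PySem.Str.lower c) pl
        || !(PySem.Set.inter pt (PySem.Set.ofList (PySem.Str.split₀ (PySem.Str.lower c)))).isEmpty with hcond
    by_cases hcv : cond = true
    · simp [hcv]
    · have hcv' : cond = false := by simpa using hcv
      simp only [hcv', Bool.false_eq_true, if_false, Bool.not_false, if_true]
      by_cases hin : d.contains c = true
      · simp only [hin, if_true]
        rfl
      · have hin' : d.contains c = false := by simpa using hin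
        simp only [hin', Bool.false_eq_true, if_false]
        have h1 : (d.insert c []).modify c [] (fun l => l ++ [post])
            = (d.insert c []).insert c (((d.insert c []).getD c []) ++ [post]) := rfl
        rw [h1, PySem.Dict.getD_insert_self, PySem.Dict.insert_insert_self,
            PySem.Dict.getD_of_not_contains d _ hin']

-- every name produced by the collecting fold is kept (given kept seeds)
theorem pvKept_foldl (pl : String) (pt : PySem.Set String) :
    ∀ (rest : List (List (String × String))) (ns : List String),
      (∀ x ∈ ns, pvKept pl pt x = true) →
      ∀ x ∈ rest.foldl (pvStepN pl pt) ns, pvKept pl pt x = true := by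
  intro rest
  induction rest with
  | nil => intro ns h x hx; exact h x hx
  | cons post rest ih =>
    intro ns h x hx
    simp only [List.foldl_cons] at hx
    refine ih _ ?_ x hx
    intro y hy
    unfold pvStepN at hy
    by_cases hcnd : (pvKept pl pt (pvComp post) && !(ns.contains (pvComp post))) = true
    · rw [if_pos hcnd] at hy
      rcases List.mem_append.mp hy with h1 | h1
      · exact h y h1
      · rw [List.mem_singleton] at h1; subst h1
        exact (Bool.and_eq_true _ _ |>.mp hcnd).1
    · rw [if_neg hcnd] at hy; exact h y hy

set_option maxHeartbeats 1000000 in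
theorem pvMain (pl : String) (pt : PySem.Set String) :
    ∀ (rest : List (List (String × String))) (d : PySem.Dict String (List (List (String × String)))),
      d.keys.Nodup → (∀ c ∈ d.keys, pvKept pl pt c = true) →
      (rest.foldl (pvStepA pl pt) d).items
        = (rest.foldl (pvStepN pl pt) d.keys).map
            (fun c => (c, d.getD c [] ++ rest.filter (fun p => pvComp p == c))) := by
  intro rest
  induction rest with
  | nil =>
    intro d hnd _
    simp only [List.foldl_nil, List.filter_nil, List.append_nil]
    exact PySem.Dict.items_eq_map_keys d hnd []
  | cons post rest ih =>
    intro d hnd hkept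
    simp only [List.foldl_cons]
    obtain ⟨c, hc⟩ : ∃ c, pvComp post = c := ⟨_, rfl⟩
    by_cases hk : pvKept pl pt c = true
    · -- kept company: A updates the dict, B records the name (if new)
      have hA : pvStepA pl pt d post = d.insert c (d.getD c [] ++ [post]) := by
        rw [pvStepA_eq, hc, if_pos hk]
      set d' := d.insert c (d.getD c [] ++ [post]) with hd'
      have hnd' : d'.keys.Nodup := PySem.Dict.nodup_keys_insert d _ _ hnd
      have hkeys' : d'.keys = if d.contains c then d.keys else d.keys ++ [c] := by
        by_cases hin : d.contains c = true
        · rw [if_pos hin]; exact PySem.Dict.keys_insert_of_contains d _ hin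
        · rw [if_neg hin]
          exact PySem.Dict.keys_insert_of_not_contains d _ (by simpa using hin)
      have hkept' : ∀ x ∈ d'.keys, pvKept pl pt x = true := by
        intro x hx
        rw [hkeys'] at hx
        by_cases hin : d.contains c = true
        · rw [if_pos hin] at hx; exact hkept x hx
        · rw [if_neg hin] at hx
          rcases List.mem_append.mp hx with h1 | h1
          · exact hkept x h1
          · rw [List.mem_singleton] at h1; subst h1; exact hk
      have hN : pvStepN pl pt d.keys post = d'.keys := by
        unfold pvStepN
        rw [hkeys']
        by_cases hin : d.contains c = true
        · have hmem : c ∈ d.keys := (PySem.Dict.contains_iff_mem_keys d c).mp hin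
          simp [hc, hmem, hin]
        · have hmem : ¬ c ∈ d.keys := fun hmem =>
            hin ((PySem.Dict.contains_iff_mem_keys d c).mpr hmem)
          simp [hc, hmem, hk, hin]
      rw [hA, hN, ih d' hnd' hkept']
      apply List.map_congr_left
      intro x hx
      have hxk : pvKept pl pt x = true := pvKept_foldl pl pt rest d'.keys hkept' x hx
      by_cases hxc : x = c
      · subst hxc
        have h1 : d'.getD x [] = d.getD x [] ++ [post] := by
          rw [hd']; exact PySem.Dict.getD_insert_self d x _ []
        have hbeq : (pvComp post == x) = true := by simp [hc]
        simp [hbeq, h1]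
      · have h1 : d'.getD x [] = d.getD x [] := by
          rw [hd']; exact PySem.Dict.getD_insert_of_ne d _ _ hxc
        have hbeq : (pvComp post == x) = false := by
          simp only [hc, beq_eq_false_iff_ne, ne_eq]
          exact fun h => hxc h.symm
        simp [hbeq, h1]
    · -- empty or prime-like company: both sides skip it
      have hk' : pvKept pl pt c = false := by simpa using hk
      have hA : pvStepA pl pt d post = d := by
        rw [pvStepA_eq, hc, hk']; simp
      have hN : pvStepN pl pt d.keys post = d.keys := by
        unfold pvStepN; simp [hc, hk']
      rw [hA, hN, ih d hnd hkept]
      apply List.map_congr_left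
      intro x hx
      have hxk : pvKept pl pt x = true := pvKept_foldl pl pt rest d.keys hkept x hx
      have hbeq : (pvComp post == x) = false := by
        simp only [hc, beq_eq_false_iff_ne, ne_eq]
        intro h; rw [h] at hk'; rw [hxk] at hk'; simp at hk'
      simp [hbeq]

-- the two ports, written via the abstracted fold steps (definitional)
theorem pvPortA_eq (posts : List (List (String × String))) (prime_name : String) :
    identify_subcontractors_py posts prime_name
      = (posts.foldl (pvStepA (PySem.Str.lower prime_name)
          (PySem.Set.ofList (PySem.Str.split₀ (PySem.Str.lower prime_name)))) PySem.Dict.empty).items := rfl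

theorem pvPortB_eq (posts : List (List (String × String))) (prime_name : String) :
    identify_subcontractors_py_alt posts prime_name
      = (posts.foldl (pvStepN (PySem.Str.lower prime_name)
          (PySem.Set.ofList (PySem.Str.split₀ (PySem.Str.lower prime_name)))) []).map
          (fun c => (c, posts.filter (fun p => pvComp p == c))) := rfl

-- ===== VERDICT =====
set_option maxHeartbeats 1000000 in
theorem identify_subcontractors_py_spec : Claim_equal_identify_subcontractors_py := by
  intro posts prime_name _
  unfold Spec_identify_subcontractors_py
  rw [pvPortA_eq, pvPortB_eq]
  have hke : (PySem.Dict.empty : PySem.Dict String (List (List (String × String)))).keys = [] := rfl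
  have h := pvMain (PySem.Str.lower prime_name)
      (PySem.Set.ofList (PySem.Str.split₀ (PySem.Str.lower prime_name))) posts
      PySem.Dict.empty (by rw [hke]; exact List.nodup_nil) (by rw [hke]; intro c hcm; cases hcm)
  rw [hke] at h
  rw [h]
  apply List.map_congr_left
  intro x _
  simp [PySem.Dict.getD_empty]
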